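-- pv_equiv track=rewrite | github.com/Cutie-Poochi/thesightseeingbrownie | thesightseeingbrownie.py | split_next_word
-- ===== SOURCE A (Python) =====
-- def remove_start_space(text):
--     count = 0
--     while count < len(text):
--         letter = text[count]
--         if letter != ' ' and letter != '\n':
--             break
--         count += 1
--     return text[count:]
--
-- def split_next_word(text):
--     text = remove_start_space(text)
--     count = 0
--     while count < len(text):
--         letter = text[count]
--         if letter == ' ' or letter == '\n':
--             break
--         count += 1
--     if count == len(text):
--         return text, ''
--     return text[:count], remove_start_space(text[count:])
-- ===== SOURCE B (Python) =====
-- def split_next_word(text):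
--     # One-pass three-state machine over the characters (indices recorded as we go),
--     # instead of A's three staged scans (strip, word scan, strip remainder).
--     state = 0          # 0: skipping leading separators, 1: inside word, 2: skipping separators after word
--     start = 0          # index where the word starts
--     end = len(text)    # index one past the word
--     rest = len(text)   # index where the remainder starts
--     for i, c in enumerate(text):
--         sep = c == ' ' or c == '\n'
--         if state == 0:
--             if not sep:
--                 state = 1
--                 start = i
--         elif state == 1:
--             if sep:
--                 state = 2
--                 end = i
--         else:
--             if not sep:
--                 rest = i
--                 break
--     if state == 0:
--         return '', ''
--     if state == 1:
--         return text[start:], ''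
--     return text[start:end], text[rest:]
-- ===== Notes on version B (the rewrite author's own statement) =====
-- stated objective: alternative
-- what changed: Replaced A's three staged scans (strip leading separators, scan the word, strip the remainder's leading separators) by a single forward pass over the characters driven by a three-state machine that records the word's start/end and the remainder's start index, then slices once at the end.
import Mathlib
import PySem

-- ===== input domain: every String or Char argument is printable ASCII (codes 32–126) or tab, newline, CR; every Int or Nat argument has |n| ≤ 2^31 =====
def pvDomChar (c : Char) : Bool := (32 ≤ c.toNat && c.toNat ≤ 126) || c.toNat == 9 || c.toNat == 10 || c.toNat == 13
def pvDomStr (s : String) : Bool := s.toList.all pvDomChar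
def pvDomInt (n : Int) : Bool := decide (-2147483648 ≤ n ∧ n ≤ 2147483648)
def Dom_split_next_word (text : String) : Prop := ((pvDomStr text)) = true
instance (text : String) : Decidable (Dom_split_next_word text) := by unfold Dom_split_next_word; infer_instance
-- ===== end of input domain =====

-- B replaces A's three staged scans with one forward pass driven by a three-state machine (alternative decomposition, same cost).

-- ===== PORT A =====
-- the 'while count < len(text)' loop of remove_start_space: returns the final count
def pvRssLoop (s : List Char) (count : Nat) : Nat :=
  if _h : count < s.length then
    match s[count]? with
    | some letter => if letter ≠ ' ' ∧ letter ≠ '\n' then count else pvRssLoop s (count + 1)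
    | none => count  -- unreachable: count < len(text)
  else count
termination_by s.length - count

def remove_start_space (text : String) : String :=
  let count := pvRssLoop text.toList 0
  String.ofList (PySem.List.slice text.toList (some (count : Int)) none)  -- text[count:]

-- the word-scanning 'while' loop of split_next_word: returns the final count
def pvWordLoop (s : List Char) (count : Nat) : Nat :=
  if _h : count < s.length then
    match s[count]? with
    | some letter => if letter = ' ' ∨ letter = '\n' then count else pvWordLoop s (count + 1)
    | none => count  -- unreachable: count < len(text)
  else count
termination_by s.length - count

def split_next_word (text : String) : String × String :=
  let text := remove_start_space text
  let count := pvWordLoop text.toList 0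
  if count = text.toList.length then (text, "")
  else (String.ofList (PySem.List.slice text.toList none (some (count : Int))),
        remove_start_space (String.ofList (PySem.List.slice text.toList (some (count : Int)) none)))

-- ===== PORT B =====
def pvSep (c : Char) : Bool := c == ' ' || c == '\n'

-- the 'for i, c in enumerate(text)' state machine of Source B, with its early 'break';
-- returns the final (state, start, end, rest)
def pvLoopB : List Char → Nat → Nat → Nat → Nat → Nat → Nat × Nat × Nat × Nat
  | [], _, state, start, e, r => (state, start, e, r)
  | c :: cs, i, state, start, e, r =>
    if state = 0 then
      if !pvSep c then pvLoopB cs (i+1) 1 i e r else pvLoopB cs (i+1) 0 start e r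
    else if state = 1 then
      if pvSep c then pvLoopB cs (i+1) 2 start i r else pvLoopB cs (i+1) 1 start e r
    else
      if !pvSep c then (2, start, e, i)  -- the 'break'
      else pvLoopB cs (i+1) 2 start e r

def split_next_word_alt (text : String) : String × String :=
  let l := text.toList
  let n := l.length
  match pvLoopB l 0 0 0 n n with
  | (state, start, e, r) =>
    if state = 0 then ("", "")
    else if state = 1 then (String.ofList (l.drop start), "")       -- text[start:]
    else (String.ofList ((l.drop start).take (e - start)),          -- text[start:end], here 0 ≤ start ≤ end ≤ n
          String.ofList (l.drop r))                                 -- text[rest:]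

-- ===== PRECONDITION & SPEC =====
def Spec_split_next_word (text : String) (out : String × String) : Prop := out = split_next_word_alt text
instance (text : String) (out : String × String) : Decidable (Spec_split_next_word text out) := by unfold Spec_split_next_word; infer_instance

-- ===== CLAIM (what is proved, stated in full; the proofs are below) =====
def Claim_equal_split_next_word : Prop := ∀ (text : String), Dom_split_next_word text → Spec_split_next_word text (split_next_word text)

-- ===== LEMMAS AND PROOFS =====

theorem drop_len_takeWhile (p : Char → Bool) (l : List Char) :
    l.drop (l.takeWhile p).length = l.dropWhile p := by
  have h : l.drop (l.takeWhile p).length = (l.takeWhile p ++ l.dropWhile p).drop (l.takeWhile p).length := by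
    rw [List.takeWhile_append_dropWhile]
  rw [h]; exact List.drop_left

-- A's first loop computes the length of the pvSep-prefix
theorem pvRssLoop_eq (s : List Char) : ∀ count, pvRssLoop s count = count + ((s.drop count).takeWhile pvSep).length := by
  intro count
  induction count using pvRssLoop.induct s with
  | case1 count h letter hget hc =>
    rw [pvRssLoop]
    simp only [dif_pos h, hget, if_pos hc]
    rw [List.drop_eq_getElem_cons h]
    have heq : s[count] = letter := by
      rw [List.getElem?_eq_getElem h] at hget
      exact Option.some.inj hget
    rw [heq]
    have hsep : pvSep letter = false := by
      simp only [pvSep, Bool.or_eq_false_iff, beq_eq_false_iff_ne]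
      exact hc
    simp [List.takeWhile, hsep]
  | case2 count h letter hget hc ih =>
    rw [pvRssLoop]
    simp only [dif_pos h, hget, if_neg hc]
    rw [ih, List.drop_eq_getElem_cons h]
    have heq : s[count] = letter := by
      rw [List.getElem?_eq_getElem h] at hget
      exact Option.some.inj hget
    rw [heq]
    have hsep : pvSep letter = true := by
      simp only [pvSep, Bool.or_eq_true_iff, beq_iff_eq]
      by_contra hcon
      push Not at hcon
      exact hc ⟨hcon.1, hcon.2⟩
    simp only [List.takeWhile, hsep]
    simp; omega
  | case3 count h hget =>
    have := List.getElem?_eq_none_iff.mp hget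
    omega
  | case4 count h =>
    rw [pvRssLoop]
    simp only [dif_neg h]
    have : s.drop count = [] := List.drop_eq_nil_of_le (by omega)
    simp [this]

-- A's second loop computes the length of the non-pvSep-prefix
theorem pvWordLoop_eq (s : List Char) : ∀ count, pvWordLoop s count = count + ((s.drop count).takeWhile (fun c => !pvSep c)).length := by
  intro count
  induction count using pvWordLoop.induct s with
  | case1 count h letter hget hc =>
    rw [pvWordLoop]
    simp only [dif_pos h, hget, if_pos hc]
    rw [List.drop_eq_getElem_cons h]
    have heq : s[count] = letter := by
      rw [List.getElem?_eq_getElem h] at hget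
      exact Option.some.inj hget
    rw [heq]
    have hsep : pvSep letter = true := by
      simp only [pvSep, Bool.or_eq_true_iff, beq_iff_eq]
      exact hc
    simp [List.takeWhile, hsep]
  | case2 count h letter hget hc ih =>
    rw [pvWordLoop]
    simp only [dif_pos h, hget, if_neg hc]
    rw [ih, List.drop_eq_getElem_cons h]
    have heq : s[count] = letter := by
      rw [List.getElem?_eq_getElem h] at hget
      exact Option.some.inj hget
    rw [heq]
    have hsep : pvSep letter = false := by
      simp only [pvSep, Bool.or_eq_false_iff, beq_eq_false_iff_ne]
      push Not at hc
      exact hc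
    simp only [List.takeWhile, hsep]
    simp; omega
  | case3 count h hget =>
    have := List.getElem?_eq_none_iff.mp hget
    omega
  | case4 count h =>
    rw [pvWordLoop]
    simp only [dif_neg h]
    have : s.drop count = [] := List.drop_eq_nil_of_le (by omega)
    simp [this]

theorem remove_start_space_eq (text : String) :
    remove_start_space text = String.ofList (text.toList.dropWhile pvSep) := by
  unfold remove_start_space
  rw [pvRssLoop_eq]
  simp only [List.drop_zero, Nat.zero_add]
  rw [PySem.List.slice_from_natCast, drop_len_takeWhile]

theorem dropWhile_cons_head (p : Char → Bool) (l l' : List Char) (c : Char)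
    (h : l.dropWhile p = c :: l') : p c = false := by
  induction l with
  | nil => simp at h
  | cons a as ih =>
    rw [List.dropWhile_cons] at h
    split_ifs at h with ha
    · exact ih h
    · cases h
      simpa using ha

-- one-step reductions of B's state machine (one per state/character class)
theorem pvStepB0f (c : Char) (cs : List Char) (i s e r : Nat) (hc : pvSep c = false) :
    pvLoopB (c :: cs) i 0 s e r = pvLoopB cs (i+1) 1 i e r := by simp [pvLoopB, hc]
theorem pvStepB0t (c : Char) (cs : List Char) (i s e r : Nat) (hc : pvSep c = true) :
    pvLoopB (c :: cs) i 0 s e r = pvLoopB cs (i+1) 0 s e r := by simp [pvLoopB, hc]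
theorem pvStepB1t (c : Char) (cs : List Char) (i s e r : Nat) (hc : pvSep c = true) :
    pvLoopB (c :: cs) i 1 s e r = pvLoopB cs (i+1) 2 s i r := by simp [pvLoopB, hc]
theorem pvStepB1f (c : Char) (cs : List Char) (i s e r : Nat) (hc : pvSep c = false) :
    pvLoopB (c :: cs) i 1 s e r = pvLoopB cs (i+1) 1 s e r := by simp [pvLoopB, hc]
theorem pvStepB2f (c : Char) (cs : List Char) (i s e r : Nat) (hc : pvSep c = false) :
    pvLoopB (c :: cs) i 2 s e r = (2, s, e, i) := by simp [pvLoopB, hc]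
theorem pvStepB2t (c : Char) (cs : List Char) (i s e r : Nat) (hc : pvSep c = true) :
    pvLoopB (c :: cs) i 2 s e r = pvLoopB cs (i+1) 2 s e r := by simp [pvLoopB, hc]

-- phase 2 of B's machine: skip separators, break (recording the index) at the first non-separator
theorem pvLoopB2 : ∀ (l : List Char) (i s e r : Nat),
    pvLoopB l i 2 s e r =
      if l.dropWhile pvSep = [] then (2, s, e, r)
      else (2, s, e, i + (l.takeWhile pvSep).length) := by
  intro l
  induction l with
  | nil => intro i s e r; simp [pvLoopB]
  | cons c cs ih =>
    intro i s e r
    cases hc : pvSep c with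
    | false =>
      rw [pvStepB2f c cs i s e r hc]
      simp [hc]
    | true =>
      rw [pvStepB2t c cs i s e r hc, ih]
      simp only [List.dropWhile_cons, List.takeWhile_cons, hc, if_true, List.length_cons]
      split_ifs with h
      · rfl
      · have harith : i + 1 + (List.takeWhile pvSep cs).length
            = i + ((List.takeWhile pvSep cs).length + 1) := by omega
        rw [harith]

-- phase 1: scan the word, then hand over to phase 2 past the first separator
theorem pvLoopB1 : ∀ (l : List Char) (i s e r : Nat),
    pvLoopB l i 1 s e r =
      if (l.takeWhile (fun c => !pvSep c)).length = l.length then (1, s, e, r)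
      else pvLoopB (l.drop ((l.takeWhile (fun c => !pvSep c)).length + 1))
            (i + (l.takeWhile (fun c => !pvSep c)).length + 1) 2 s
            (i + (l.takeWhile (fun c => !pvSep c)).length) r := by
  intro l
  induction l with
  | nil => intro i s e r; simp [pvLoopB]
  | cons c cs ih =>
    intro i s e r
    cases hc : pvSep c with
    | true =>
      rw [pvStepB1t c cs i s e r hc]
      simp [hc, pvLoopB2]
    | false =>
      rw [pvStepB1f c cs i s e r hc, ih]
      simp only [List.takeWhile_cons, hc, Bool.not_false, if_true, List.length_cons]
      generalize (List.takeWhile (fun c => !pvSep c) cs).length = k'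
      split_ifs with h1 h2 h3
      · rfl
      · omega
      · omega
      · simp only [List.drop_succ_cons]
        have e1 : i + 1 + k' + 1 = i + (k' + 1) + 1 := by omega
        have e2 : i + 1 + k' = i + (k' + 1) := by omega
        rw [e1, e2]

-- phase 0: skip leading separators, then hand over to phase 1 at the first word character
theorem pvLoopB0 : ∀ (l : List Char) (i s e r : Nat),
    pvLoopB l i 0 s e r =
      if (l.takeWhile pvSep).length = l.length then (0, s, e, r)
      else pvLoopB (l.drop ((l.takeWhile pvSep).length + 1))
            (i + (l.takeWhile pvSep).length + 1) 1 (i + (l.takeWhile pvSep).length) e r := by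
  intro l
  induction l with
  | nil => intro i s e r; simp [pvLoopB]
  | cons c cs ih =>
    intro i s e r
    cases hc : pvSep c with
    | false =>
      rw [pvStepB0f c cs i s e r hc]
      simp [hc]
    | true =>
      rw [pvStepB0t c cs i s e r hc, ih]
      simp only [List.takeWhile_cons, hc, if_true, List.length_cons]
      generalize (List.takeWhile pvSep cs).length = j'
      split_ifs with h1 h2 h3
      · rfl
      · omega
      · omega
      · simp only [List.drop_succ_cons]
        have e1 : i + 1 + j' + 1 = i + (j' + 1) + 1 := by omega
        have e2 : i + 1 + j' = i + (j' + 1) := by omega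
        rw [e1, e2]

-- ===== VERDICT (by name: the statement is the Claim_ definition above) =====
theorem split_next_word_spec : Claim_equal_split_next_word := by
  intro text _
  unfold Spec_split_next_word split_next_word split_next_word_alt
  rw [remove_start_space_eq]
  simp only [String.toList_ofList]
  set l := text.toList with hl
  set j := (l.takeWhile pvSep).length with hj
  set u := l.dropWhile pvSep with hu
  have hjle : j ≤ l.length := (List.takeWhile_prefix _).length_le
  have hdj : l.drop j = u := drop_len_takeWhile pvSep l
  rw [pvWordLoop_eq]
  simp only [List.drop_zero, Nat.zero_add]
  set k := (u.takeWhile (fun c => !pvSep c)).length with hk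
  have hkle : k ≤ u.length := (List.takeWhile_prefix _).length_le
  have hulen : u.length = l.length - j := by rw [← hdj]; simp
  rw [pvLoopB0]
  simp only [← hj, Nat.zero_add]
  by_cases hempty : j = l.length
  · -- all separators: u = [], both sides give ("", "")
    have hu0 : u = [] := by rw [← hdj]; exact List.drop_eq_nil_of_le (by omega)
    rw [if_pos hempty]
    simp [hu0, hk]
  · rw [if_neg hempty]
    have hjlt : j < l.length := lt_of_le_of_ne hjle hempty
    have hune : u ≠ [] := by
      rw [← hdj]
      intro h
      have := List.drop_eq_nil_iff.mp h
      omega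
    obtain ⟨c, u', hcu⟩ := List.exists_cons_of_ne_nil hune
    have hcsep : pvSep c = false :=
      dropWhile_cons_head pvSep l u' c (hu.symm.trans hcu)
    have hdj1 : l.drop (j + 1) = u' := by
      have h1 : l.drop (j + 1) = (l.drop j).drop 1 := by rw [List.drop_drop]
      rw [h1, hdj, hcu]
      rfl
    have hk1 : k = (u'.takeWhile (fun c => !pvSep c)).length + 1 := by
      rw [hk, hcu, List.takeWhile_cons, hcsep]
      simp
    rw [pvLoopB1, hdj1]
    set k' := (u'.takeWhile (fun c => !pvSep c)).length with hk'def
    by_cases hword : k = u.length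
    · -- the word runs to the end of the text: both sides give (word, "")
      have hk'full : k' = u'.length := by
        rw [hcu] at hword
        simp only [List.length_cons] at hword
        omega
      rw [if_pos hk'full, if_pos hword]
      simp [hdj]
    · -- a separator follows the word
      have hklt : k < u.length := lt_of_le_of_ne hkle hword
      have hk'ne : ¬ k' = u'.length := by
        rw [hcu] at hklt
        simp only [List.length_cons] at hklt
        omega
      rw [if_neg hk'ne, if_neg hword]
      have hdp : l.drop (j + k) = u.drop k := by
        rw [← hdj, List.drop_drop]
      set w := u.drop k with hw
      have hwne : w ≠ [] := by
        rw [hw]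
        intro h
        have := List.drop_eq_nil_iff.mp h
        omega
      obtain ⟨d, w', hdw⟩ := List.exists_cons_of_ne_nil hwne
      have hdsep : pvSep d = true := by
        have h1 : u.dropWhile (fun c => !pvSep c) = d :: w' := by
          rw [← drop_len_takeWhile (fun c => !pvSep c) u, ← hk, ← hw, hdw]
        have h2 := dropWhile_cons_head (fun c => !pvSep c) u w' d h1
        simpa using h2
      have hdjk1 : l.drop (j + k + 1) = w' := by
        have h1 : l.drop (j + k + 1) = (l.drop (j + k)).drop 1 := by rw [List.drop_drop]
        rw [h1, hdp, hdw, List.drop_one, List.tail_cons]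
      have hu'drop : u'.drop (k' + 1) = w' := by
        have h1 : u'.drop (k' + 1) = l.drop (j + k + 1) := by
          rw [← hdj1, List.drop_drop]
          congr 1
          omega
        rw [h1, hdjk1]
      have hAword : PySem.List.slice u none (some ((k : Nat) : Int)) = u.take k := by
        rw [PySem.List.slice_to_natCast]
      have hArest : PySem.List.slice u (some ((k : Nat) : Int)) none = w := by
        rw [PySem.List.slice_from_natCast, hw]
      rw [hu'drop, pvLoopB2, hAword, hArest, remove_start_space_eq, String.toList_ofList]
      have hBword : (l.drop j).take (j + 1 + k' - j) = u.take k := by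
        have h1 : j + 1 + k' - j = k := by omega
        rw [h1, hdj]
      by_cases hwd : w'.dropWhile pvSep = []
      · -- only separators after the word: the machine never breaks, rest stays n
        have hwdrop : w.dropWhile pvSep = [] := by
          rw [hdw, List.dropWhile_cons, hdsep]
          simpa using hwd
        rw [if_pos hwd, hwdrop]
        simp [hBword]
      · -- the machine breaks at the first character of the remainder
        have hwdrop : w.dropWhile pvSep = w'.dropWhile pvSep := by
          rw [hdw, List.dropWhile_cons, hdsep]
          simp
        have hdroprest : l.drop (j + 1 + k' + 1 + (w'.takeWhile pvSep).length) = w'.dropWhile pvSep := by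
          have h1 : l.drop (j + 1 + k' + 1 + (w'.takeWhile pvSep).length)
              = (l.drop (j + k + 1)).drop (w'.takeWhile pvSep).length := by
            rw [List.drop_drop]
            congr 1
            omega
          rw [h1, hdjk1, drop_len_takeWhile]
        rw [if_neg hwd, hwdrop]
        simp [hBword, hdroprest]
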